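-- pv_equiv track=rewrite | github.com/scondeurv/labelpropagation | spark_baseline/run_spark_graph_benchmarks.py | normalize_partition_labels
-- ===== SOURCE A (Python) =====
-- def normalize_partition_labels(labels: list[int]) -> list[int]:
--     mapping: dict[int, int] = {}
--     normalized: list[int] = []
--     next_id = 0
--     for label in labels:
--         if label not in mapping:
--             mapping[label] = next_id
--             next_id += 1
--         normalized.append(mapping[label])
--     return normalized
-- ===== SOURCE B (Python) =====
-- def normalize_partition_labels(labels: list[int]) -> list[int]:
--     # Definition-style: a label's normalized id is the number of distinct
--     # labels occurring strictly before its first occurrence.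
--     return [len(set(labels[:labels.index(label)])) for label in labels]
-- ===== Notes on version B (the rewrite author's own statement) =====
-- stated objective: alternative
-- what changed: Drops A's incrementally built first-appearance dict entirely: B computes each id directly from the definition, as the count of distinct labels strictly before the label's first occurrence (index + set over a prefix), trading A's single stateful pass for a table-free per-element computation.
import Mathlib
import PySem

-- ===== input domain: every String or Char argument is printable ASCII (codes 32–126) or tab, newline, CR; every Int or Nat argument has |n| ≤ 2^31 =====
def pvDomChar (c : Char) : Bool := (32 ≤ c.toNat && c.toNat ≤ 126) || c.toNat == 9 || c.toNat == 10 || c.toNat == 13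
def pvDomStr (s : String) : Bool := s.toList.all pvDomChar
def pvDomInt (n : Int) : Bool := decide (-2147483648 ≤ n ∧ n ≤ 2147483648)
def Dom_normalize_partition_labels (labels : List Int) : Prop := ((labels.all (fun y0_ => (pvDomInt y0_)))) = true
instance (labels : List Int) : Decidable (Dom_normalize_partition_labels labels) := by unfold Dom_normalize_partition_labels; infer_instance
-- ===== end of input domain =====

-- B drops A's incrementally built first-appearance dict: each id is computed directly from the
-- definition as the number of distinct labels strictly before the label's first occurrence
-- (index + set over a prefix, O(n^2)); objective: alternative (table-free), not faster.

-- ===== PORT A =====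
-- the body of A's for-loop: state = (mapping, normalized, next_id)
def pvStepA (st : PySem.Dict Int Int × List Int × Int) (label : Int) :
    PySem.Dict Int Int × List Int × Int :=
  if st.1.contains label = false then
    -- label not in mapping: mapping[label] = next_id; next_id += 1
    let mapping := st.1.insert label st.2.2
    (mapping, st.2.1 ++ [mapping.getD label 0], st.2.2 + 1)
  else
    (st.1, st.2.1 ++ [st.1.getD label 0], st.2.2)

def normalize_partition_labels (labels : List Int) : List Int :=
  (labels.foldl pvStepA (PySem.Dict.empty, [], 0)).2.1

-- ===== PORT B =====
-- [len(set(labels[:labels.index(label)])) for label in labels]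
def normalize_partition_labels_alt (labels : List Int) : List Int :=
  labels.map (fun label =>
    match PySem.List.index? labels label with
    | some i => PySem.Set.len (PySem.Set.ofList (PySem.List.slice labels none (some (i : Int))))
    | none => 0)  -- labels.index would raise ValueError; unreachable: label ∈ labels

-- ===== PRECONDITION & SPEC =====
def Spec_normalize_partition_labels (labels : List Int) (out : List Int) : Prop := out = normalize_partition_labels_alt labels
instance (labels : List Int) (out : List Int) : Decidable (Spec_normalize_partition_labels labels out) := by unfold Spec_normalize_partition_labels; infer_instance

-- ===== CLAIM (what is proved, stated in full; the proofs are below) =====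
def Claim_equal_normalize_partition_labels : Prop := ∀ (labels : List Int), Dom_normalize_partition_labels labels → Spec_normalize_partition_labels labels (normalize_partition_labels labels)

-- ===== LEMMAS AND PROOFS =====

-- proof-only helper: the dict {uniq[i] ↦ i} (A's mapping after seeing the distinct labels uniq)
def pvMapB (uniq : List Int) : PySem.Dict Int Int :=
  (PySem.List.enumerate uniq 0).foldl (fun d p => d.insert p.2 p.1) PySem.Dict.empty

-- lookup in pvMapB-style dicts is first-appearance index (generalized start/dict)
theorem pv_getD_mapAux (us : List Int) (hnd : us.Nodup) (s : Int) (d : PySem.Dict Int Int)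
    (l : Int) :
    ((PySem.List.enumerate us s).foldl (fun d p => d.insert p.2 p.1) d).getD l 0
      = if l ∈ us then s + (us.idxOf l : Int) else d.getD l 0 := by
  induction us generalizing s d with
  | nil => simp [PySem.List.enumerate_nil]
  | cons x t ih =>
    rcases List.nodup_cons.mp hnd with ⟨hx, hnt⟩
    rw [PySem.List.enumerate_cons]
    simp only [List.foldl_cons]
    rw [ih hnt]
    by_cases hlx : l = x
    · subst hlx
      simp [hx, List.idxOf_cons_self, PySem.Dict.getD_insert_self]
    · by_cases hlt : l ∈ t
      · simp [hlt, hlx, List.idxOf_cons_ne _ (Ne.symm hlx)]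
        ring
      · simp [hlt, hlx, PySem.Dict.getD_insert]

-- membership in pvMapB-style dicts
theorem pv_contains_mapAux (us : List Int) (s : Int) (d : PySem.Dict Int Int) (l : Int) :
    ((PySem.List.enumerate us s).foldl (fun d p => d.insert p.2 p.1) d).contains l
      = decide (l ∈ us ∨ l ∈ d.keys) := by
  rw [PySem.Dict.contains_eq_decide_mem_keys,
      PySem.Dict.keys_foldl_insert_key (key := fun p : Int × Int => p.2)
        (f := fun d p => p.1)]
  simp [PySem.List.map_snd_enumerate, PySem.Set.mem_update, or_comm]

-- appending one fresh key to the uniq list = one more insert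
theorem pv_mapAux_append (ys : List Int) (x : Int) (s : Int) (d : PySem.Dict Int Int) :
    (PySem.List.enumerate (ys ++ [x]) s).foldl (fun d p => d.insert p.2 p.1) d
      = ((PySem.List.enumerate ys s).foldl (fun d p => d.insert p.2 p.1) d).insert x
          (s + (ys.length : Int)) := by
  induction ys generalizing s d with
  | nil => simp [PySem.List.enumerate_nil, PySem.List.enumerate_cons]
  | cons y t ih =>
    rw [List.cons_append, PySem.List.enumerate_cons, PySem.List.enumerate_cons]
    simp only [List.foldl_cons]
    rw [ih]
    congr 1
    push_cast [List.length_cons]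
    ring

-- the invariant of A's loop: starting from the state that corresponds to the already-seen
-- distinct labels us, the loop extends the dict à la dict.fromkeys and appends
-- first-appearance indices
theorem pv_loopA_inv (rest : List Int) (us : List Int) (hnd : us.Nodup) (acc : List Int) :
    rest.foldl pvStepA (pvMapB us, acc, (us.length : Int))
      = (pvMapB (PySem.Set.update us rest),
         acc ++ rest.map (fun l => (((PySem.Set.update us rest).idxOf l : Nat) : Int)),
         (((PySem.Set.update us rest).length : Nat) : Int)) := by
  induction rest generalizing us acc with
  | nil => simp [PySem.Set.update_nil]
  | cons l t ih =>
    rw [PySem.Set.update_cons]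
    have hcont : (pvMapB us).contains l = decide (l ∈ us) := by
      unfold pvMapB
      rw [pv_contains_mapAux]
      simp
    by_cases hmem : l ∈ us
    · have hct : (pvMapB us).contains l = true := by rw [hcont]; simp [hmem]
      have hgd : (pvMapB us).getD l 0 = ((us.idxOf l : Nat) : Int) := by
        unfold pvMapB
        rw [pv_getD_mapAux us hnd 0 _ l]
        simp [hmem]
      have hstep : pvStepA (pvMapB us, acc, (us.length : Int)) l
          = (pvMapB us, acc ++ [((us.idxOf l : Nat) : Int)], (us.length : Int)) := by
        simp [pvStepA, hct, hgd]
      rw [List.foldl_cons, hstep, PySem.Set.add_of_mem hmem, ih us hnd]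
      have hpref : (PySem.Set.update us t).idxOf l = us.idxOf l := by
        rw [PySem.Set.update_eq_append_filter, List.idxOf_append_of_mem hmem]
      simp [hpref, List.append_assoc]
    · have hcf : (pvMapB us).contains l = false := by rw [hcont]; simp [hmem]
      have hm' : (pvMapB us).insert l (us.length : Int) = pvMapB (us ++ [l]) := by
        unfold pvMapB
        rw [pv_mapAux_append]
        simp
      have hgd : (pvMapB (us ++ [l])).getD l 0 = ((us.length : Nat) : Int) := by
        rw [← hm', PySem.Dict.getD_insert_self]
      have hstep : pvStepA (pvMapB us, acc, (us.length : Int)) l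
          = (pvMapB (us ++ [l]), acc ++ [((us.length : Nat) : Int)],
             ((us ++ [l]).length : Int)) := by
        simp [pvStepA, hcf, hm', hgd]
      have hnd' : (us ++ [l]).Nodup := by
        simp [List.nodup_append, hnd]
        intro a ha h
        exact hmem (h ▸ ha)
      rw [List.foldl_cons, hstep, ih (us ++ [l]) hnd', PySem.Set.add_of_not_mem hmem]
      have hidx : (PySem.Set.update (us ++ [l]) t).idxOf l = us.length := by
        rw [PySem.Set.update_eq_append_filter,
            List.idxOf_append_of_mem (by simp : l ∈ us ++ [l]),
            List.idxOf_append_of_notMem hmem]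
        simp [List.idxOf_cons_self]
      simp [hidx, List.append_assoc]

-- index? returns the first index for a present element
theorem pv_index?_of_mem (xs : List Int) (v : Int) (h : v ∈ xs) :
    PySem.List.index? xs v = some (xs.idxOf v) := by
  rw [PySem.List.index?_eq_idxOf?]
  induction xs with
  | nil => cases h
  | cons x t ih =>
    by_cases hvx : x = v
    · simp [List.idxOf?_cons, hvx]
    · rcases List.mem_cons.mp h with h1 | h2
      · exact absurd h1.symm hvx
      · simp [List.idxOf?_cons, hvx, ih h2]

-- B's per-element value: the number of distinct labels before the first occurrence of l
-- equals l's index in the ordered dedup of the whole list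
theorem pv_prefix_distinct_eq_idxOf (labels : List Int) (l : Int) (hl : l ∈ labels) :
    (PySem.Set.ofList (labels.take (labels.idxOf l))).length
      = (PySem.Set.ofList labels).idxOf l := by
  have hsome := pv_index?_of_mem labels l hl
  obtain ⟨pre, suf, hx, hlen, hnp⟩ := (PySem.List.index?_eq_some_iff labels l _).mp hsome
  rw [hx] at hlen ⊢
  have htake : (pre ++ l :: suf).take ((pre ++ l :: suf).idxOf l) = pre := by
    rw [← hlen, List.take_left]
  have hnp' : l ∉ PySem.Set.ofList pre := by simpa [PySem.Set.mem_ofList] using hnp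
  have hof : PySem.Set.ofList (pre ++ l :: suf)
      = PySem.Set.update (PySem.Set.ofList pre ++ [l]) suf := by
    rw [show PySem.Set.ofList (pre ++ l :: suf)
          = (pre ++ l :: suf).foldl PySem.Set.add [] from rfl,
        List.foldl_append, List.foldl_cons,
        show pre.foldl PySem.Set.add [] = PySem.Set.ofList pre from rfl,
        PySem.Set.add_of_not_mem hnp']
    rfl
  rw [htake, hof, PySem.Set.update_eq_append_filter,
      List.idxOf_append_of_mem (by simp : l ∈ PySem.Set.ofList pre ++ [l]),
      List.idxOf_append_of_notMem hnp']
  simp [List.idxOf_cons_self]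

-- ===== VERDICT (by name: the statement is the Claim_ definition above) =====
theorem normalize_partition_labels_spec : Claim_equal_normalize_partition_labels := by
  intro labels _
  unfold Spec_normalize_partition_labels
  have hA : normalize_partition_labels labels
      = labels.map (fun l => (((PySem.Set.ofList labels).idxOf l : Nat) : Int)) := by
    unfold normalize_partition_labels
    have h0 : (PySem.Dict.empty, ([] : List Int), (0 : Int))
        = (pvMapB [], ([] : List Int), (([] : List Int).length : Int)) := by
      simp [pvMapB, PySem.List.enumerate_nil]
    rw [h0, pv_loopA_inv labels [] List.nodup_nil []]
    simp [PySem.Set.update_nil_left]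
  rw [hA]
  unfold normalize_partition_labels_alt
  apply List.map_congr_left
  intro l hl
  have hsome := pv_index?_of_mem labels l hl
  rw [hsome]
  simp only [PySem.List.slice_to_natCast, PySem.Set.len]
  rw [pv_prefix_distinct_eq_idxOf labels l hl]
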